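-- pv_equiv track=rewrite | github.com/jingle77/Harsanyi | dividends.py | enumerate_coalitions
-- ===== SOURCE A (Python) =====
-- from itertools import combinations
-- from typing import Callable, Dict, Iterable, List, Mapping, Optional, Sequence, Tuple
--
-- Coalition = Tuple[str, ...]
--
-- def enumerate_coalitions(features: Sequence[str], max_size: int) -> List[Coalition]:
--     """
--     Enumerate all non-empty coalitions up to given size.
--
--     Coalitions are represented as sorted tuples of feature names.
--     """
--     features_sorted = sorted(features)
--     coalitions: List[Coalition] = []
--     max_size = min(max_size, len(features_sorted))
--
--     for k in range(1, max_size + 1):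
--         for combo in combinations(features_sorted, k):
--             coalitions.append(combo)
--
--     return coalitions
-- ===== SOURCE B (Python) =====
-- def _suffix_starts(lst):
--     # all (element, suffix-after-it) pairs of lst, in order
--     out = []
--     while lst:
--         out.append((lst[0], lst[1:]))
--         lst = lst[1:]
--     return out
--
--
-- def enumerate_coalitions(features, max_size):
--     fs = sorted(features)
--     cap = max_size if max_size < len(fs) else len(fs)
--     result = []
--     level = [((x,), rest) for x, rest in _suffix_starts(fs)]
--     size = 1
--     while size <= cap:
--         for combo, _ in level:
--             result.append(combo)
--         nxt = []
--         for combo, rest in level: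
--             for x, rest2 in _suffix_starts(rest):
--                 nxt.append((combo + (x,), rest2))
--         level = nxt
--         size += 1
--     return result
-- ===== Notes on version B (the rewrite author's own statement) =====
-- stated objective: alternative
-- what changed: Replaces itertools.combinations with a breadth-first level frontier: each coalition is carried with the suffix of the sorted list after its last chosen element, and each level is built by extending every coalition of the previous level with every element of its suffix.
import Mathlib
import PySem

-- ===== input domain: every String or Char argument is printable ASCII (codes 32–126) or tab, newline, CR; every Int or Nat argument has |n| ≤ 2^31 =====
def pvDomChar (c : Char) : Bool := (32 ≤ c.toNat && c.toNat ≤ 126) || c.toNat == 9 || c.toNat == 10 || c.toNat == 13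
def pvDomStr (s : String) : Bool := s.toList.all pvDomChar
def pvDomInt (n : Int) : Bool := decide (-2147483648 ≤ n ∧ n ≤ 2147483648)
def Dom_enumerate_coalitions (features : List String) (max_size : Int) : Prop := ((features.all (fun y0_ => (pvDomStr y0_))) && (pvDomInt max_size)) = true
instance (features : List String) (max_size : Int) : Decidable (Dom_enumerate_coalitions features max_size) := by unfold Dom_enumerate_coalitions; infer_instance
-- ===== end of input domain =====

-- B replaces itertools.combinations with a level-by-level frontier of (coalition, remaining-suffix)
-- pairs, extending each coalition by every element of its suffix (objective: alternative algorithm).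

-- ===== PORT A =====
-- itertools.combinations(fs, k) in Python's lexicographic-by-position order
def pyCombinations : List String → Nat → List (List String)
  | _, 0 => [[]]
  | [], _ + 1 => []
  | x :: xs, k + 1 => (pyCombinations xs k).map (fun c => x :: c) ++ pyCombinations xs (k + 1)

def enumerate_coalitions (features : List String) (max_size : Int) : List (List String) :=
  let fs := PySem.List.sorted features (fun x => x)
  let m := min max_size (fs.length : Int)
  (PySem.List.pyRange 1 (m + 1) 1).foldl (fun acc k => acc ++ pyCombinations fs k.toNat) []

-- ===== PORT B =====
-- _suffix_starts(lst): all (element, suffix-after-it) pairs, in order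
def sufStarts : List String → List (String × List String)
  | [] => []
  | x :: xs => (x, xs) :: sufStarts xs

-- the inner "for x, rest2 in _suffix_starts(rest): nxt.append((combo + (x,), rest2))"
def extendLevel (p : List String × List String) : List (List String × List String) :=
  (sufStarts p.2).map (fun q => (p.1 ++ [q.1], q.2))

-- the "while size <= cap" loop: emit the current level's coalitions, then build the next level
def buildLevels : Nat → List (List String × List String) → List (List String)
  | 0, _ => []
  | k + 1, level => level.map Prod.fst ++ buildLevels k (level.flatMap extendLevel)

def enumerate_coalitions_alt (features : List String) (max_size : Int) : List (List String) :=
  let fs := PySem.List.sorted features (fun x => x)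
  let cap := if max_size < (fs.length : Int) then max_size else (fs.length : Int)
  buildLevels cap.toNat ((sufStarts fs).map (fun q => ([q.1], q.2)))

-- ===== PRECONDITION & SPEC =====
def Spec_enumerate_coalitions (features : List String) (max_size : Int) (out : List (List String)) : Prop := out = enumerate_coalitions_alt features max_size
instance (features : List String) (max_size : Int) (out : List (List String)) : Decidable (Spec_enumerate_coalitions features max_size out) := by unfold Spec_enumerate_coalitions; infer_instance

-- ===== CLAIM (what is proved, stated in full; the proofs are below) =====
def Claim_equal_enumerate_coalitions : Prop := ∀ (features : List String) (max_size : Int), Dom_enumerate_coalitions features max_size → Spec_enumerate_coalitions features max_size (enumerate_coalitions features max_size)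

-- ===== LEMMAS AND PROOFS =====

-- combinations paired with the suffix after the last chosen element
def combsP : List String → Nat → List (List String × List String)
  | xs, 0 => [([], xs)]
  | [], _ + 1 => []
  | x :: xs, k + 1 => (combsP xs k).map (fun p => (x :: p.1, p.2)) ++ combsP xs (k + 1)

theorem combsP_fst (xs : List String) : ∀ k, (combsP xs k).map Prod.fst = pyCombinations xs k := by
  induction xs with
  | nil => intro k; cases k <;> simp [combsP, pyCombinations]
  | cons x xs ih =>
    intro k
    cases k with
    | zero => simp [combsP, pyCombinations]
    | succ k =>
      simp only [combsP, pyCombinations, List.map_append, List.map_map, ← ih]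
      rfl

theorem combsP_one (xs : List String) : combsP xs 1 = (sufStarts xs).map (fun q => ([q.1], q.2)) := by
  induction xs with
  | nil => simp [combsP, sufStarts]
  | cons x xs ih => simp [combsP, sufStarts, ih]

theorem extendLevel_cons (x : String) (c r : List String) :
    extendLevel (x :: c, r) = (extendLevel (c, r)).map (fun p => (x :: p.1, p.2)) := by
  simp [extendLevel, List.map_map]

theorem combsP_succ (xs : List String) : ∀ k, combsP xs (k + 1) = (combsP xs k).flatMap extendLevel := by
  induction xs with
  | nil =>
    intro k
    cases k <;> simp [combsP, extendLevel, sufStarts]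
  | cons x xs ih =>
    intro k
    cases k with
    | zero =>
      simp [combsP, extendLevel, sufStarts, combsP_one]
    | succ k =>
      show combsP (x :: xs) (k + 2) = _
      simp only [combsP, List.flatMap_append, List.flatMap_map]
      have h1 : (combsP xs k).flatMap (fun p => extendLevel (x :: p.1, p.2)) =
          ((combsP xs k).flatMap extendLevel).map (fun p => (x :: p.1, p.2)) := by
        rw [List.map_flatMap]
        apply List.flatMap_congr
        intro p _
        rw [← extendLevel_cons]
      rw [h1, ← ih k, ← ih (k + 1)]

theorem buildLevels_eq (fs : List String) : ∀ (j k : Nat),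
    buildLevels j (combsP fs (k + 1)) = (List.range j).flatMap (fun i => pyCombinations fs (k + 1 + i)) := by
  intro j
  induction j with
  | zero => intro k; simp [buildLevels]
  | succ j ih =>
    intro k
    rw [List.range_succ_eq_map]
    simp only [buildLevels, ← combsP_succ, List.flatMap_cons, List.flatMap_map]
    rw [combsP_fst, ih (k + 1)]
    have h2 : (List.range j).flatMap (fun a => pyCombinations fs (k + 1 + (a + 1))) =
        (List.range j).flatMap (fun i => pyCombinations fs (k + 1 + 1 + i)) := by
      apply List.flatMap_congr
      intro i _
      congr 1
      omega
    simp [h2]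

-- ===== VERDICT (by name: the statement is the Claim_ definition above) =====
theorem enumerate_coalitions_spec : Claim_equal_enumerate_coalitions := by
  intro features max_size _
  unfold Spec_enumerate_coalitions enumerate_coalitions enumerate_coalitions_alt
  simp only []
  set fs := PySem.List.sorted features (fun x => x) with hfs
  have hcap : min max_size (fs.length : Int) = (if max_size < (fs.length : Int) then max_size else (fs.length : Int)) := by
    rw [min_def]; split_ifs <;> omega
  rw [← hcap]
  set m := min max_size (fs.length : Int) with hm
  rw [PySem.List.foldl_append_eq_flatMap, List.nil_append, ← combsP_one, buildLevels_eq fs m.toNat 0]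
  have hmm : m + 1 - 1 = m := by omega
  rw [PySem.List.pyRange_one, hmm, List.flatMap_map]
  apply List.flatMap_congr
  intro i _
  congr 1
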